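-- pv_equiv track=rewrite | github.com/AliAbedAlHadi/cleaning_Database_Normalization | schema.py | resolve_chunk_tables
-- ===== SOURCE A (Python) =====
-- from typing import Dict, List, Set, Optional, Tuple
--
-- def resolve_chunk_tables(graph: Dict[str, Set[str]], table: str, visited: Optional[Set[str]] = None) -> Set[str]:
--     if visited is None:
--         visited = set()
--     if table in visited:
--         return visited
--     visited.add(table)
--     for fk_table in graph.get(table, []):
--         resolve_chunk_tables(graph, fk_table, visited)
--     return visited
-- ===== SOURCE B (Python) =====
-- def resolve_chunk_tables(graph, table, visited=None):
--     if visited is None: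
--         visited = set()
--     stack = [table]
--     while stack:
--         node = stack.pop()
--         if node not in visited:
--             visited.add(node)
--             stack.extend(reversed(list(graph.get(node, []))))
--     return visited
-- ===== Notes on version B (the rewrite author's own statement) =====
-- stated objective: alternative
-- what changed: Replaced A's recursive DFS over the foreign-key graph with an iterative DFS using an explicit stack (check-on-pop, neighbors pushed in reverse), producing the same visited set without recursion.
import Mathlib
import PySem

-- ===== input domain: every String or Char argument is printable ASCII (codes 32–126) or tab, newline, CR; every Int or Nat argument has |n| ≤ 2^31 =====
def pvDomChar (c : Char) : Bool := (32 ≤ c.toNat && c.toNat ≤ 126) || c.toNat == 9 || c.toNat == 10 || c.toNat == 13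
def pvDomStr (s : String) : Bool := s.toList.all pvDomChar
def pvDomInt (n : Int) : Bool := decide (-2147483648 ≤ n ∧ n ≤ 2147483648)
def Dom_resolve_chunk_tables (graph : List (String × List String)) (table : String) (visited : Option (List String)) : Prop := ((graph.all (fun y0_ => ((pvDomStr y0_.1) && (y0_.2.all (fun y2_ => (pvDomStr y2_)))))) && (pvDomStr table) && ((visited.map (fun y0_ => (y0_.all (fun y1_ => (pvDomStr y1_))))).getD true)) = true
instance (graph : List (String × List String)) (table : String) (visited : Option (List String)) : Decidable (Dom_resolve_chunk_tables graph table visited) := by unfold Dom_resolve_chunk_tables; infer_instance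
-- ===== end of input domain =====

-- A is a recursive DFS over the foreign-key graph; B is an iterative DFS with an explicit
-- stack (check on pop, neighbors pushed in reverse), same visited set in the same insertion
-- order.  Both Pythons mutate the caller's `visited` set in place identically; the theorems
-- below are about the returned value.  The Lean ports use a fuel counter only to make the
-- same computation total; the fuel chosen is provably sufficient (the stability lemmas below).

-- ===== PORT A =====
-- graph.get(t, [])
def pvNbrs (graph : List (String × List String)) (t : String) : List String :=
  (PySem.Dict.mk graph).getD t []

-- all strings occurring in the graph (keys and neighbor lists); only used to size the fuel
def pvAllN (graph : List (String × List String)) : List String :=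
  graph.map Prod.fst ++ (graph.map Prod.snd).flatten

-- the recursive body of A; fuel (first argument) only makes the recursion total
def pvVisitA (graph : List (String × List String)) : Nat → String → List String → List String
  | 0, _, v => v
  | f+1, t, v =>
    if t ∈ v then v
    else (pvNbrs graph t).foldl (fun acc fk => pvVisitA graph f fk acc) (PySem.Set.add v t)

def resolve_chunk_tables (graph : List (String × List String)) (table : String) (visited : Option (List String)) : List String :=
  pvVisitA graph ((pvAllN graph).length + 1) table (visited.getD PySem.Set.empty)

-- ===== PORT B =====
-- number of graph nodes not yet visited; with pvD below it sizes B's fuel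
def pvM (graph : List (String × List String)) (v : List String) : Nat :=
  ((pvAllN graph).filter (fun x => decide (x ∉ v))).length

def pvD (graph : List (String × List String)) : Nat :=
  ((graph.map Prod.snd).flatten).length

-- the while-loop of B.  The Lean stack is the REVERSE of the Python list `stack`:
-- Python's `stack.pop()` (last element) is the head here, and Python's
-- `stack.extend(reversed(ns))` followed by popping is exactly `ns ++ rest` here.
-- Fuel (first argument) only makes the loop total.
def pvLoopB (graph : List (String × List String)) : Nat → List String → List String → List String
  | 0, _, v => v
  | _+1, [], v => v
  | f+1, node :: rest, v =>
    if node ∈ v then pvLoopB graph f rest v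
    else pvLoopB graph f (pvNbrs graph node ++ rest) (PySem.Set.add v node)

def resolve_chunk_tables_alt (graph : List (String × List String)) (table : String) (visited : Option (List String)) : List String :=
  let v0 := visited.getD PySem.Set.empty
  pvLoopB graph (1 + pvM graph v0 * (1 + pvD graph)) [table] v0

-- ===== PRECONDITION & SPEC =====
def Spec_resolve_chunk_tables (graph : List (String × List String)) (table : String) (visited : Option (List String)) (out : List String) : Prop := out = resolve_chunk_tables_alt graph table visited
instance (graph : List (String × List String)) (table : String) (visited : Option (List String)) (out : List String) : Decidable (Spec_resolve_chunk_tables graph table visited out) := by unfold Spec_resolve_chunk_tables; infer_instance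

-- ===== CLAIM (what is proved, stated in full; the proofs are below) =====
def Claim_equal_resolve_chunk_tables : Prop := ∀ (graph : List (String × List String)) (table : String) (visited : Option (List String)), Dom_resolve_chunk_tables graph table visited → Spec_resolve_chunk_tables graph table visited (resolve_chunk_tables graph table visited)

-- ===== LEMMAS AND PROOFS =====

-- canonical (fuel-stabilized) values of the two loops
def pvA (graph : List (String × List String)) (t : String) (v : List String) : List String :=
  pvVisitA graph (pvM graph v + 1) t v

def pvBound (graph : List (String × List String)) (s : List String) (v : List String) : Nat :=
  s.length + pvM graph v * (1 + pvD graph)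

def pvB (graph : List (String × List String)) (s : List String) (v : List String) : List String :=
  pvLoopB graph (pvBound graph s v) s v

theorem pv_filter_mono {α : Type} (l : List α) (p q : α → Bool)
    (h : ∀ x, q x = true → p x = true) :
    (l.filter q).length ≤ (l.filter p).length := by
  induction l with
  | nil => simp
  | cons a l ih =>
    by_cases hq : q a = true
    · simp [List.filter, hq, h a hq]; omega
    · simp only [List.filter, hq]
      cases hp : p a
      · simp_all
      · simp_all; omega

theorem pv_filter_strict {α : Type} (l : List α) (p q : α → Bool) (t : α)
    (ht : t ∈ l) (htp : p t = true) (htq : q t = false)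
    (h : ∀ x, q x = true → p x = true) :
    (l.filter q).length < (l.filter p).length := by
  induction l with
  | nil => simp at ht
  | cons a l ih =>
    rcases List.mem_cons.mp ht with rfl | ha
    · simp only [List.filter, htq, htp]
      have := pv_filter_mono l p q h
      simp; omega
    · have := ih ha
      by_cases hq : q a = true
      · simp [List.filter, hq, h a hq]; omega
      · simp only [List.filter, hq]
        cases hp : p a <;> simp <;> omega

theorem pvM_le_of_subset (graph : List (String × List String)) (v w : List String)
    (h : ∀ x, x ∈ v → x ∈ w) : pvM graph w ≤ pvM graph v := by
  apply pv_filter_mono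
  intro x hx
  simp only [decide_eq_true_eq] at hx ⊢
  exact fun hv => hx (h x hv)

theorem pvM_lt_of_add (graph : List (String × List String)) (v : List String) (t : String)
    (htN : t ∈ pvAllN graph) (htv : t ∉ v) :
    pvM graph (PySem.Set.add v t) < pvM graph v := by
  apply pv_filter_strict _ _ _ t htN
  · simpa using htv
  · simp [PySem.Set.mem_add]
  · intro x hx
    simp only [decide_eq_true_eq] at hx ⊢
    exact fun hv => hx ((PySem.Set.mem_add v t x).mpr (Or.inl hv))

theorem pvM_eq_of_add_not_mem (graph : List (String × List String)) (v : List String) (t : String)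
    (htN : t ∉ pvAllN graph) :
    pvM graph (PySem.Set.add v t) = pvM graph v := by
  unfold pvM
  congr 1
  apply List.filter_congr
  intro x hx
  have hxt : x ≠ t := fun h => htN (h ▸ hx)
  simp only [decide_eq_decide, PySem.Set.mem_add]
  constructor
  · intro hna hv; exact hna (Or.inl hv)
  · intro hnv hor; rcases hor with h | h
    · exact hnv h
    · exact hxt h

theorem pvNbrs_of_not_memN (graph : List (String × List String)) (t : String)
    (h : t ∉ pvAllN graph) : pvNbrs graph t = [] := by
  have hk : t ∉ (graph.map Prod.fst) := fun hm => h (List.mem_append_left _ hm)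
  unfold pvNbrs
  apply PySem.Dict.getD_of_not_contains
  cases hc : (PySem.Dict.mk graph).contains t
  · rfl
  · exact absurd (by simpa [PySem.Dict.keys_mk] using
      ((PySem.Dict.contains_iff_mem_keys (PySem.Dict.mk graph) t).mp hc)) hk

theorem pvNbrs_len_le (graph : List (String × List String)) (t : String) :
    (pvNbrs graph t).length ≤ pvD graph := by
  unfold pvNbrs pvD
  rw [PySem.Dict.getD_eq_get?_getD]
  cases hg : (PySem.Dict.mk graph).get? t with
  | none => simp
  | some ns =>
    have hmem : (t, ns) ∈ (PySem.Dict.mk graph).items := PySem.Dict.mem_items_of_get?_eq_some _ hg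
    have hns : ns ∈ graph.map Prod.snd := by
      have : (t, ns) ∈ graph := hmem
      exact List.mem_map.mpr ⟨(t, ns), this, rfl⟩
    simp only [Option.getD_some]
    rcases List.mem_iff_append.mp hns with ⟨l1, l2, heq⟩
    rw [heq]
    simp
    omega

-- generic: a fold of extending steps extends
theorem pv_fold_prefix (h : String → List String → List String)
    (H : ∀ t v, ∃ w, h t v = v ++ w) :
    ∀ (ns : List String) (a : List String), ∃ w, ns.foldl (fun acc x => h x acc) a = a ++ w := by
  intro ns
  induction ns with
  | nil => intro a; exact ⟨[], by simp⟩
  | cons n ns ih =>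
    intro a
    obtain ⟨w1, hw1⟩ := H n a
    obtain ⟨w2, hw2⟩ := ih (h n a)
    refine ⟨w1 ++ w2, ?_⟩
    rw [hw1] at hw2
    rw [List.foldl_cons, hw1, hw2, List.append_assoc]

-- the result of pvVisitA extends its input set
theorem pvVisitA_prefix (graph : List (String × List String)) :
    ∀ f t v, ∃ w, pvVisitA graph f t v = v ++ w := by
  intro f
  induction f with
  | zero => intro t v; exact ⟨[], by simp [pvVisitA]⟩
  | succ f ih =>
    intro t v
    simp only [pvVisitA]
    split
    · exact ⟨[], by simp⟩
    · rename_i htv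
      obtain ⟨w, hw⟩ := pv_fold_prefix (fun t v => pvVisitA graph f t v) (ih) (pvNbrs graph t) (PySem.Set.add v t)
      refine ⟨[t] ++ w, ?_⟩
      rw [hw, PySem.Set.add_of_not_mem htv, List.append_assoc]

theorem pvM_visitA_le (graph : List (String × List String)) (f : Nat) (t : String) (v : List String) :
    pvM graph (pvVisitA graph f t v) ≤ pvM graph v := by
  obtain ⟨w, hw⟩ := pvVisitA_prefix graph f t v
  exact pvM_le_of_subset graph v _ (fun x hx => by rw [hw]; exact List.mem_append_left _ hx)

-- the inner fold of A, with fuel raised by one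
theorem pv_foldA_step (graph : List (String × List String)) (f : Nat)
    (IH : ∀ t v, pvM graph v + 1 ≤ f → pvVisitA graph f t v = pvVisitA graph (f+1) t v) :
    ∀ (ns : List String) (a : List String), pvM graph a + 1 ≤ f →
      ns.foldl (fun acc x => pvVisitA graph f x acc) a
        = ns.foldl (fun acc x => pvVisitA graph (f+1) x acc) a := by
  intro ns
  induction ns with
  | nil => intro a _; rfl
  | cons n ns ih =>
    intro a ha
    simp only [List.foldl]
    rw [IH n a ha]
    exact ih _ (le_trans (by have := pvM_visitA_le graph (f+1) n a; omega) ha)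

-- fuel stability for A
theorem pvVisitA_step (graph : List (String × List String)) :
    ∀ f t v, pvM graph v + 1 ≤ f → pvVisitA graph f t v = pvVisitA graph (f+1) t v := by
  intro f
  induction f with
  | zero => intro t v h; omega
  | succ f ih =>
    intro t v h
    simp only [pvVisitA]
    split
    · rfl
    · rename_i htv
      by_cases htN : t ∈ pvAllN graph
      · apply pv_foldA_step graph f ih
        have := pvM_lt_of_add graph v t htN htv
        omega
      · rw [pvNbrs_of_not_memN graph t htN]
        rfl

theorem pvVisitA_fuel (graph : List (String × List String)) :
    ∀ f t v, pvM graph v + 1 ≤ f → pvVisitA graph f t v = pvA graph t v := by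
  have key : ∀ d t v, pvVisitA graph (pvM graph v + 1 + d) t v = pvA graph t v := by
    intro d
    induction d with
    | zero => intro t v; rfl
    | succ d ih =>
      intro t v
      have := pvVisitA_step graph (pvM graph v + 1 + d) t v (by omega)
      rw [show pvM graph v + 1 + (d+1) = (pvM graph v + 1 + d) + 1 by omega, ← this]
      exact ih t v
  intro f t v h
  have : f = pvM graph v + 1 + (f - (pvM graph v + 1)) := by omega
  rw [this]
  exact key _ t v

-- the new pvLoopB state after popping an unvisited node keeps its bound below the old one
theorem pvBound_pop (graph : List (String × List String)) (node : String) (rest v : List String)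
    (hnv : node ∉ v) :
    pvBound graph (pvNbrs graph node ++ rest) (PySem.Set.add v node) + 1
      ≤ pvBound graph (node :: rest) v := by
  by_cases hN : node ∈ pvAllN graph
  · have h1 := pvM_lt_of_add graph v node hN hnv
    have h2 := pvNbrs_len_le graph node
    unfold pvBound at *
    have h3 : (pvM graph (PySem.Set.add v node) + 1) * (1 + pvD graph)
        ≤ pvM graph v * (1 + pvD graph) := Nat.mul_le_mul_right _ (by omega)
    rw [Nat.add_mul] at h3
    simp only [List.length_append, List.length_cons]
    omega
  · unfold pvBound
    rw [pvNbrs_of_not_memN graph node hN, pvM_eq_of_add_not_mem graph v node hN]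
    simp only [List.nil_append, List.length_cons]
    omega

-- fuel stability for B
theorem pvLoopB_step (graph : List (String × List String)) :
    ∀ f s v, pvBound graph s v ≤ f → pvLoopB graph f s v = pvLoopB graph (f+1) s v := by
  intro f
  induction f with
  | zero =>
    intro s v h
    unfold pvBound at h
    have : s = [] := List.length_eq_zero_iff.mp (by omega)
    subst this
    rfl
  | succ f ih =>
    intro s v h
    match s with
    | [] => rfl
    | node :: rest =>
      simp only [pvLoopB]
      split
      · exact ih rest v (by unfold pvBound at *; simp_all; omega)
      · rename_i hnv
        exact ih _ _ (by have := pvBound_pop graph node rest v hnv; omega)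

theorem pvLoopB_fuel (graph : List (String × List String)) :
    ∀ f s v, pvBound graph s v ≤ f → pvLoopB graph f s v = pvB graph s v := by
  have key : ∀ d s v, pvLoopB graph (pvBound graph s v + d) s v = pvB graph s v := by
    intro d
    induction d with
    | zero => intro s v; rfl
    | succ d ih =>
      intro s v
      have := pvLoopB_step graph (pvBound graph s v + d) s v (by omega)
      rw [show pvBound graph s v + (d+1) = (pvBound graph s v + d) + 1 by omega, ← this]
      exact ih s v
  intro f s v h
  rw [show f = pvBound graph s v + (f - pvBound graph s v) by omega]
  exact key _ s v

theorem pvM_pvA_le (graph : List (String × List String)) (t : String) (v : List String) :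
    pvM graph (pvA graph t v) ≤ pvM graph v :=
  pvM_visitA_le graph (pvM graph v + 1) t v

-- the inner fold of A, each call replaced by its canonical (fuel-stabilized) value
theorem pv_foldA_canon (graph : List (String × List String)) (f : Nat) :
    ∀ (ns : List String) (a : List String), pvM graph a + 1 ≤ f →
      ns.foldl (fun acc n => pvVisitA graph f n acc) a
        = ns.foldl (fun acc n => pvA graph n acc) a := by
  intro ns
  induction ns with
  | nil => intro a _; rfl
  | cons n ns ih =>
    intro a ha
    simp only [List.foldl]
    rw [pvVisitA_fuel graph f n a ha]
    exact ih _ (le_trans (by have := pvM_pvA_le graph n a; omega) ha)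

-- one call of A unfolded into a fold of canonical calls over the neighbors
theorem pvA_unfold (graph : List (String × List String)) (t : String) (v : List String)
    (htv : t ∉ v) :
    pvA graph t v = (pvNbrs graph t).foldl (fun acc n => pvA graph n acc) (PySem.Set.add v t) := by
  unfold pvA
  simp only [pvVisitA, if_neg htv]
  by_cases htN : t ∈ pvAllN graph
  · exact pv_foldA_canon graph (pvM graph v) (pvNbrs graph t) (PySem.Set.add v t)
      (by have := pvM_lt_of_add graph v t htN htv; omega)
  · rw [pvNbrs_of_not_memN graph t htN]
    rfl

theorem pvB_nil (graph : List (String × List String)) (w : List String) :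
    pvB graph [] w = w := by
  unfold pvB
  generalize pvBound graph [] w = n
  cases n <;> rfl

-- one recursive call of A = one pushed node of B (the classical DFS equivalence)
theorem pv_main (graph : List (String × List String)) :
    ∀ k t s v, pvM graph v ≤ k → pvB graph (t :: s) v = pvB graph s (pvA graph t v) := by
  intro k
  induction k using Nat.strong_induction_on with
  | _ k SIH =>
    intro t s v hk
    have hb : pvBound graph (t :: s) v = pvBound graph s v + 1 := by
      unfold pvBound; simp only [List.length_cons]; omega
    show pvLoopB graph (pvBound graph (t :: s) v) (t :: s) v = _
    rw [hb]
    by_cases htv : t ∈ v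
    · simp only [pvLoopB, if_pos htv]
      rw [pvLoopB_fuel graph _ s v (le_refl _)]
      have hA : pvA graph t v = v := by unfold pvA; simp only [pvVisitA, if_pos htv]
      rw [hA]
    · simp only [pvLoopB, if_neg htv]
      have hstep := pvBound_pop graph t s v htv
      rw [pvLoopB_fuel graph _ _ _ (by omega)]
      rw [pvA_unfold graph t v htv]
      by_cases htN : t ∈ pvAllN graph
      · have hlt : pvM graph (PySem.Set.add v t) < pvM graph v := pvM_lt_of_add graph v t htN htv
        have G : ∀ (ns s' a : List String), pvM graph a < pvM graph v →
            pvB graph (ns ++ s') a = pvB graph s' (ns.foldl (fun acc n => pvA graph n acc) a) := by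
          intro ns
          induction ns with
          | nil => intro s' a _; rfl
          | cons n ns ih =>
            intro s' a ha
            have h1 : pvB graph (n :: (ns ++ s')) a = pvB graph (ns ++ s') (pvA graph n a) :=
              SIH (pvM graph a) (lt_of_lt_of_le ha hk) n (ns ++ s') a (le_refl _)
            calc pvB graph ((n :: ns) ++ s') a
                = pvB graph (ns ++ s') (pvA graph n a) := h1
              _ = pvB graph s' (ns.foldl (fun acc n => pvA graph n acc) (pvA graph n a)) :=
                  ih s' _ (lt_of_le_of_lt (pvM_pvA_le graph n a) ha)
              _ = _ := rfl
        exact G (pvNbrs graph t) s (PySem.Set.add v t) hlt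
      · rw [pvNbrs_of_not_memN graph t htN]
        rfl

-- ===== VERDICT (by name: the statement is the Claim_ definition above) =====
theorem resolve_chunk_tables_spec : Claim_equal_resolve_chunk_tables := by
  intro graph table visited _
  unfold Spec_resolve_chunk_tables resolve_chunk_tables resolve_chunk_tables_alt
  show pvVisitA graph ((pvAllN graph).length + 1) table (visited.getD PySem.Set.empty)
    = pvLoopB graph _ [table] (visited.getD PySem.Set.empty)
  generalize visited.getD PySem.Set.empty = v0
  have hm : pvM graph v0 ≤ (pvAllN graph).length := List.length_filter_le _ _
  rw [pvVisitA_fuel graph _ table v0 (by omega)]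
  have hbound : pvBound graph [table] v0 = 1 + pvM graph v0 * (1 + pvD graph) := by
    unfold pvBound; simp [Nat.add_comm]
  rw [show (1 + pvM graph v0 * (1 + pvD graph)) = pvBound graph [table] v0 from hbound.symm]
  rw [pvLoopB_fuel graph _ [table] v0 (le_refl _)]
  rw [pv_main graph (pvM graph v0) table [] v0 (le_refl _)]
  rw [pvB_nil]
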